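-- pv_equiv track=rewrite | github.com/qyx1996/JianZhiOffer | JZ45. 扑克牌顺子.py | IsContinuous
-- ===== SOURCE A (Python) =====
-- def IsContinuous(numbers):
--     if not numbers or len(numbers) != 5:
--         return None
--     numbers.sort()
--     n_zero, i = 0, 0
--     while numbers[i] == 0:
--         n_zero += 1
--         i += 1
--     number_of_gap = 0
--     for index in range(n_zero, len(numbers) - 1):
--         if numbers[index] == numbers[index + 1]:
--             return False
--         number_of_gap += numbers[index + 1] - numbers[index] - 1
--     return True if number_of_gap <= n_zero else False
-- ===== SOURCE B (Python) =====
-- def IsContinuous(numbers):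
--     if not numbers or len(numbers) != 5:
--         return None
--     numbers.sort()
--     n_zero, i = 0, 0
--     while numbers[i] == 0:
--         n_zero += 1
--         i += 1
--     suffix = numbers[n_zero:]
--     if len(suffix) != len(set(suffix)):
--         return False
--     return numbers[-1] - numbers[n_zero] <= 4
-- ===== Notes on version B (the rewrite author's own statement) =====
-- stated objective: simpler
-- what changed: Replaced A's pairwise gap-accumulation loop over the sorted hand with a duplicate test on the non-zero suffix (via a set) plus a closed-form span check max - min <= 4; the sort and the zero-counting while-loop (and its IndexError on five zeros) are kept, and both versions sort the list in place.
-- outside the precondition, e.g. on IsContinuous([0, 0, 0, 0, 0]): A raises IndexError, B raises IndexError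
import Mathlib
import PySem

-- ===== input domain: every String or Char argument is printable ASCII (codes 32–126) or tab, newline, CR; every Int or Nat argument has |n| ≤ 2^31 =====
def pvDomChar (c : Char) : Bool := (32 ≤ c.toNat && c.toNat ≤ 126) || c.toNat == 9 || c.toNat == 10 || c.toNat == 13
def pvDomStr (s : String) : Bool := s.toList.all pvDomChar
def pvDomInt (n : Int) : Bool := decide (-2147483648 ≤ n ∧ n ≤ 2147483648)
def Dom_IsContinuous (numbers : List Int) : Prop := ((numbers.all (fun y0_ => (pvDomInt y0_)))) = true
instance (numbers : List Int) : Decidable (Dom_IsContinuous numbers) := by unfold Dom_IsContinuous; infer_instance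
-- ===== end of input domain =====

-- B replaces A's pairwise gap-summation loop with a duplicate check on the non-zero suffix plus a
-- closed-form span test (max - min ≤ 4); objective: simpler. Both A and B sort `numbers` in place
-- (same observable mutation); the equivalence proved is about the return value.

-- ===== PORT A =====
-- the `while numbers[i] == 0` walk: none = the walk runs past the end (IndexError, excluded by Pre_)
def pvCountLeadA : List Int → Option Nat
  | [] => none
  | x :: xs => if x = 0 then (pvCountLeadA xs).map (· + 1) else some 0

-- the `for index in range(n_zero, len-1)` loop over the non-zero suffix:
-- none = early `return False` on a duplicate, some g = accumulated number_of_gap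
def pvGapLoopA : List Int → Option Int
  | a :: b :: rest =>
      if a = b then none
      else (pvGapLoopA (b :: rest)).map (fun g => g + (b - a - 1))
  | _ => some 0

def IsContinuous (numbers : List Int) : Option Bool :=
  if numbers = [] ∨ numbers.length ≠ 5 then none
  else
    let s := PySem.List.sorted numbers (fun x => x) false
    match pvCountLeadA s with
    | none => none      -- IndexError (all cards are zeros); excluded by Pre_
    | some nz =>
      match pvGapLoopA (s.drop nz) with
      | none => some false
      | some gap => some (if gap ≤ (nz : Int) then true else false)

-- ===== PORT B =====
-- B keeps A's zero-counting while-walk (same crash on all-zeros input)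
def pvCountLeadB : List Int → Option Nat
  | [] => none
  | x :: xs => if x = 0 then (pvCountLeadB xs).map (· + 1) else some 0

def IsContinuous_alt (numbers : List Int) : Option Bool :=
  if numbers = [] ∨ numbers.length ≠ 5 then none
  else
    let s := PySem.List.sorted numbers (fun x => x) false
    match pvCountLeadB s with
    | none => none      -- IndexError; excluded by Pre_
    | some nz =>
      let suffix := PySem.List.slice s (some (nz : Int)) none
      if (PySem.Set.ofList suffix).length ≠ suffix.length then some false
      else some (decide (PySem.List.pyGetD s (-1) 0 - PySem.List.pyGetD s (nz : Int) 0 ≤ 4))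

-- ===== PRECONDITION & SPEC =====
-- Pre_ excludes only the hands of five zeros, on which A's zero-counting loop (and B's, kept
-- identically) raises IndexError.
def Pre_IsContinuous (numbers : List Int) : Prop :=
  ¬ (numbers.length = 5 ∧ ∀ x ∈ numbers, x = 0)
instance (numbers : List Int) : Decidable (Pre_IsContinuous numbers) := by
  unfold Pre_IsContinuous; infer_instance
def pvWitness_IsContinuous : List Int := [1, 3, 2, 0, 5]
def Spec_IsContinuous (numbers : List Int) (out : Option Bool) : Prop := out = IsContinuous_alt numbers
instance (numbers : List Int) (out : Option Bool) : Decidable (Spec_IsContinuous numbers out) := by unfold Spec_IsContinuous; infer_instance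

-- ===== CLAIM (what is proved, stated in full; the proofs are below) =====
def Claim_equal_IsContinuous : Prop := ∀ (numbers : List Int), Dom_IsContinuous numbers → Pre_IsContinuous numbers → Spec_IsContinuous numbers (IsContinuous numbers)

-- ===== LEMMAS AND PROOFS =====

theorem countLeadB_eq_A : ∀ l : List Int, pvCountLeadB l = pvCountLeadA l := by
  intro l
  induction l with
  | nil => rfl
  | cons x xs ih => simp [pvCountLeadA, pvCountLeadB, ih]

theorem countLeadA_some (l : List Int) (h : ∃ x ∈ l, x ≠ 0) :
    ∃ nz, pvCountLeadA l = some nz ∧ ∃ c t, l.drop nz = c :: t := by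
  induction l with
  | nil => simp at h
  | cons x xs ih =>
    by_cases hx : x = 0
    · subst hx
      obtain ⟨nz, h1, c, t, h2⟩ := ih (by
        obtain ⟨y, hy, hy0⟩ := h
        exact ⟨y, by simpa [hy0] using hy, hy0⟩)
      exact ⟨nz + 1, by simp [pvCountLeadA, h1], c, t, by simpa using h2⟩
    · exact ⟨0, by simp [pvCountLeadA, hx], x, xs, rfl⟩

theorem gapLoopA_sorted : ∀ (c : Int) (t : List Int), (c :: t).Pairwise (· ≤ ·) →
    pvGapLoopA (c :: t) =
      if (c :: t).Nodup then some ((c :: t).getLastD 0 - c - t.length) else none := by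
  intro c t
  induction t generalizing c with
  | nil => intro _; simp [pvGapLoopA]
  | cons b rest ih =>
    intro hp
    have hcb : c ≤ b := (List.pairwise_cons.1 hp).1 b (by simp)
    have hpt : (b :: rest).Pairwise (· ≤ ·) := (List.pairwise_cons.1 hp).2
    by_cases hd : c = b
    · simp [pvGapLoopA, hd]

    · have hlt : c < b := lt_of_le_of_ne hcb hd
      have hcnot : c ∉ b :: rest := by
        intro hmem
        rcases List.mem_cons.1 hmem with h | h
        · exact hd h
        · have := (List.pairwise_cons.1 hpt).1 c h
          omega
      rw [show pvGapLoopA (c :: b :: rest)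
            = if c = b then none
              else (pvGapLoopA (b :: rest)).map (fun g => g + (b - c - 1)) from rfl]
      rw [if_neg hd, ih b hpt]
      by_cases hnd : (b :: rest).Nodup
      · have : (c :: b :: rest).Nodup := List.nodup_cons.2 ⟨hcnot, hnd⟩
        simp only [hnd, if_true, Option.map_some, this, if_true]
        congr 1
        rw [show (c :: b :: rest).getLastD 0 = (b :: rest).getLastD 0 from rfl]
        push_cast [List.length_cons]
        ring
      · have : ¬ (c :: b :: rest).Nodup := fun h => hnd (List.nodup_cons.1 h).2
        simp [hnd, this]

theorem ofList_length_eq_iff (l : List Int) :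
    (PySem.Set.ofList l).length = l.length ↔ l.Nodup := by
  have hperm : (PySem.Set.ofList l).Perm l.dedup :=
    (List.perm_ext_iff_of_nodup (PySem.Set.nodup_ofList l) l.nodup_dedup).mpr
      (fun a => by simp [PySem.Set.mem_ofList, List.mem_dedup])
  rw [hperm.length_eq]
  constructor
  · intro h
    have := l.dedup_sublist.eq_of_length h
    rw [← this]; exact l.nodup_dedup
  · intro h; rw [List.dedup_eq_self.mpr h]

theorem mainCase (s : List Int) (nz : Nat) (c : Int) (t : List Int)
    (hlen : s.length = 5)
    (hp : s.Pairwise (· ≤ ·))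
    (hdrop : s.drop nz = c :: t) :
    (match pvGapLoopA (s.drop nz) with
      | none => some false
      | some gap => some (if gap ≤ (nz : Int) then true else false) : Option Bool)
    = (if (PySem.Set.ofList (PySem.List.slice s (some (nz : Int)) none)).length
            ≠ (PySem.List.slice s (some (nz : Int)) none).length then some false
       else some (decide (PySem.List.pyGetD s (-1) 0 - PySem.List.pyGetD s (nz : Nat) 0 ≤ 4))) := by
  have hsuf : PySem.List.slice s (some (nz : Int)) none = c :: t := by
    rw [PySem.List.slice_from_natCast, hdrop]
  have hps : (c :: t).Pairwise (· ≤ ·) := hdrop ▸ hp.sublist (List.drop_sublist nz s)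
  have hnz : nz ≤ 4 := by
    have := List.length_drop (l := s) (i := nz)
    rw [hdrop, hlen] at this
    simp at this; omega
  have hlt : t.length = 4 - nz := by
    have := List.length_drop (l := s) (i := nz)
    rw [hdrop, hlen] at this
    simp at this; omega
  have hne : s ≠ [] := by intro h; simp [h] at hlen
  have hlast : PySem.List.pyGetD s (-1) 0 = (c :: t).getLastD 0 := by
    rw [PySem.List.pyGetD_neg_one s 0 hne]
    have hseq : s = s.take nz ++ c :: t := by rw [← hdrop, List.take_append_drop]
    have h1 : s.getLast? = (c :: t).getLast? := by
      conv_lhs => rw [hseq]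
      exact List.getLast?_append_cons _ c t
    have h2 : s.getLast? = some (s.getLast hne) := List.getLast?_eq_some_getLast hne
    rw [List.getLastD_eq_getLast?, ← h1, h2]; rfl
  have hfirst : PySem.List.pyGetD s (nz : Nat) 0 = c := by
    rw [PySem.List.pyGetD_natCast]
    have : s[nz]? = some c := by
      rw [← List.head?_drop, hdrop]; rfl
    simp [List.getD, this]
  rw [hdrop, hsuf, hlast, hfirst, gapLoopA_sorted c t hps]
  by_cases hnd : (c :: t).Nodup
  · have h1 : (PySem.Set.ofList (c :: t)).length = (c :: t).length :=
      (ofList_length_eq_iff _).2 hnd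
    obtain ⟨L, hL⟩ : ∃ L, (c :: t).getLastD 0 = L := ⟨_, rfl⟩
    rw [hL]
    have h4 : (L - c - (t.length : Int) ≤ (nz : Int)) ↔ (L - c ≤ 4) := by omega
    by_cases hle : L - c - (t.length : Int) ≤ (nz : Int)
    · simp [hnd, h1, hle, h4.1 hle]
    · have hno : ¬ (L - c ≤ 4) := fun h => hle (h4.2 h)
      simp [hnd, h1, hle, hno]
  · have h1 : (PySem.Set.ofList (c :: t)).length ≠ (c :: t).length :=
      fun h => hnd ((ofList_length_eq_iff _).1 h)
    rw [if_neg hnd, if_pos h1]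

-- ===== VERDICT (by name: the statement is the Claim_ definition above) =====
theorem IsContinuous_spec : Claim_equal_IsContinuous := by
  intro numbers _ hpre
  unfold Spec_IsContinuous IsContinuous IsContinuous_alt
  by_cases hc : numbers = [] ∨ numbers.length ≠ 5
  · simp [hc]
  · rw [if_neg hc, if_neg hc]
    push Not at hc
    have hlen5 : numbers.length = 5 := hc.2
    have hslen : (PySem.List.sorted numbers (fun x => x) false).length = 5 := by
      rw [PySem.List.length_sorted, hlen5]
    have hperm : (PySem.List.sorted numbers (fun x => x) false).Perm numbers :=
      PySem.List.sorted_perm numbers _ _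
    have hex : ∃ x ∈ PySem.List.sorted numbers (fun x => x) false, x ≠ 0 := by
      unfold Pre_IsContinuous at hpre
      push Not at hpre
      obtain ⟨x, hx, hx0⟩ := hpre hlen5
      exact ⟨x, hperm.mem_iff.2 hx, hx0⟩
    obtain ⟨nz, hcl, c, t, hdrop⟩ :=
      countLeadA_some (PySem.List.sorted numbers (fun x => x) false) hex
    have hp : (PySem.List.sorted numbers (fun x => x) false).Pairwise (· ≤ ·) := by
      simpa using PySem.List.sorted_pairwise numbers (fun x => x)
    simp only [countLeadB_eq_A, hcl]
    exact mainCase _ nz c t hslen hp hdrop
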